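-- pv_equiv track=rewrite | github.com/fillund/Advent-of-code | 2022/Day10.py | complete_trace
-- ===== SOURCE A (Python) =====
-- def complete_trace(data:str):
--     # Returns register x value AFTER clk [0...]
--     values = [1]
--     for line in data.splitlines():
--         if line.startswith('addx'):
--             val = int(line[5:])
--             values.append(values[-1])
--             values.append(values[-1]+val)
--         else:
--             values.append(values[-1])
--     return values
-- ===== SOURCE B (Python) =====
-- def complete_trace(data: str):
--     # Pass 1: build per-cycle deltas (initial value 1, addx contributes 0 then its operand).
--     deltas = [1]
--     for line in data.splitlines():
--         if line.startswith('addx'):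
--             deltas.append(0)
--             deltas.append(int(line[5:]))
--         else:
--             deltas.append(0)
--     # Pass 2: prefix sums give the register trace.
--     total = 0
--     out = []
--     for d in deltas:
--         total += d
--         out.append(total)
--     return out
-- ===== Notes on version B (the rewrite author's own statement) =====
-- stated objective: alternative
-- what changed: B builds a flat per-cycle delta list in one pass (0 for noop, 0 then the operand for addx) and then produces the trace by a separate prefix-sum pass, instead of A's fused loop that appends while reading values[-1].
-- outside the precondition, e.g. on complete_trace('addx'): A raises ValueError, B raises ValueError
import Mathlib
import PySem

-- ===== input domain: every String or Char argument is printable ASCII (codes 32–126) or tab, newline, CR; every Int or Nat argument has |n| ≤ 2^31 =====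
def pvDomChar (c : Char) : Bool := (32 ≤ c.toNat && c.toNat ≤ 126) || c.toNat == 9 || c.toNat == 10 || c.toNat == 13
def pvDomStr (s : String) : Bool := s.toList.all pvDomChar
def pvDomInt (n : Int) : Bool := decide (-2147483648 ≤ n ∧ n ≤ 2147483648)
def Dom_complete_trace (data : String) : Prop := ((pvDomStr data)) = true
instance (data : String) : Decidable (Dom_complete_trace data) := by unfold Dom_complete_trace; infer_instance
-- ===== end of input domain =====

-- B replaces A's fused append loop (reading values[-1]) by a delta-building pass followed by a prefix-sum pass; same cost, different decomposition.

-- ===== PORT A =====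
-- int(line[5:]) for a line (total under Pre_, which guarantees the parse succeeds)
def ctVal (line : String) : Int :=
  (PySem.Int.ofStr? (PySem.Str.slice line (some 5) none)).getD 0

def complete_trace (data : String) : List Int :=
  (PySem.Str.splitlines data).foldl
    (fun values line =>
      if PySem.Str.startswith line "addx" then
        let val := ctVal line
        let values := values ++ [PySem.List.pyGetD values (-1) 0]
        values ++ [PySem.List.pyGetD values (-1) 0 + val]
      else
        values ++ [PySem.List.pyGetD values (-1) 0])
    [1]

-- ===== PORT B =====
def complete_trace_alt (data : String) : List Int :=
  let deltas :=
    (PySem.Str.splitlines data).foldl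
      (fun ds line =>
        if PySem.Str.startswith line "addx" then ds ++ [0, ctVal line]
        else ds ++ [0])
      [1]
  (deltas.foldl (fun (acc : Int × List Int) d => (acc.1 + d, acc.2 ++ [acc.1 + d])) (0, [])).2

-- ===== PRECONDITION & SPEC =====
-- Pre_ excludes exactly the inputs where A raises ValueError: an 'addx'-prefixed line whose tail does not parse as int(...).
def Pre_complete_trace (data : String) : Prop :=
  ∀ line ∈ PySem.Str.splitlines data,
    PySem.Str.startswith line "addx" = true →
    (PySem.Int.ofStr? (PySem.Str.slice line (some 5) none)).isSome = true
instance (data : String) : Decidable (Pre_complete_trace data) := by unfold Pre_complete_trace; infer_instance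

def pvWitness_complete_trace : String := "noop\naddx 3\naddx -5"

def Spec_complete_trace (data : String) (out : List Int) : Prop := out = complete_trace_alt data
instance (data : String) (out : List Int) : Decidable (Spec_complete_trace data out) := by unfold Spec_complete_trace; infer_instance

-- ===== CLAIM (what is proved, stated in full; the proofs are below) =====
def Claim_equal_complete_trace : Prop := ∀ (data : String), Dom_complete_trace data → Pre_complete_trace data → Spec_complete_trace data (complete_trace data)

-- ===== LEMMAS AND PROOFS =====

-- A's loop body, let-reduced (definitionally equal to the lambda in complete_trace)
def aStep (values : List Int) (line : String) : List Int :=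
  if PySem.Str.startswith line "addx" then
    (values ++ [PySem.List.pyGetD values (-1) 0]) ++
      [PySem.List.pyGetD (values ++ [PySem.List.pyGetD values (-1) 0]) (-1) 0 + ctVal line]
  else
    values ++ [PySem.List.pyGetD values (-1) 0]

-- per-line deltas, as a flat list
def ctDelta (line : String) : List Int :=
  if PySem.Str.startswith line "addx" then [0, ctVal line] else [0]

-- running prefix sums starting from total t
def ctScan (t : Int) : List Int → List Int
  | [] => []
  | d :: ds => (t + d) :: ctScan (t + d) ds

theorem ctScan_foldl (xs : List Int) (t : Int) (out : List Int) :
    (xs.foldl (fun (acc : Int × List Int) d => (acc.1 + d, acc.2 ++ [acc.1 + d])) (t, out)).2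
      = out ++ ctScan t xs := by
  induction xs generalizing t out with
  | nil => simp [ctScan]
  | cons d ds ih => simp [ctScan, ih]

theorem deltas_foldl (lines : List String) (init : List Int) :
    lines.foldl
      (fun ds line =>
        if PySem.Str.startswith line "addx" then ds ++ [0, ctVal line]
        else ds ++ [0]) init
      = init ++ lines.flatMap ctDelta := by
  induction lines generalizing init with
  | nil => simp
  | cons l ls ih =>
      rw [List.foldl_cons, List.flatMap_cons]
      by_cases h : PySem.Str.startswith l "addx" = true
      · rw [if_pos h, ih]
        unfold ctDelta
        rw [if_pos h]
        simp
      · rw [if_neg h, ih]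
        unfold ctDelta
        rw [if_neg h]
        simp

theorem aFold_eq (lines : List String) (vs : List Int) (x : Int) :
    lines.foldl aStep (vs ++ [x]) = (vs ++ [x]) ++ ctScan x (lines.flatMap ctDelta) := by
  induction lines generalizing vs x with
  | nil => simp [ctScan]
  | cons l ls ih =>
      rw [List.foldl_cons, List.flatMap_cons]
      by_cases h : PySem.Str.startswith l "addx" = true
      · rw [show aStep (vs ++ [x]) l = (vs ++ [x] ++ [x]) ++ [x + ctVal l] from by
            simp only [aStep]
            rw [if_pos h]
            simp only [PySem.List.pyGetD_neg_one_append_singleton], ih]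
        unfold ctDelta
        rw [if_pos h]
        simp [ctScan]
      · rw [show aStep (vs ++ [x]) l = (vs ++ [x]) ++ [x] from by
            simp only [aStep]
            rw [if_neg h]
            simp only [PySem.List.pyGetD_neg_one_append_singleton], ih]
        unfold ctDelta
        rw [if_neg h]
        simp [ctScan]

-- ===== VERDICT (by name: the statement is the Claim_ definition above) =====
theorem complete_trace_spec : Claim_equal_complete_trace := by
  intro data _ _
  show complete_trace data = complete_trace_alt data
  have hA : complete_trace data = (PySem.Str.splitlines data).foldl aStep ([] ++ [1]) := rfl
  rw [hA, aFold_eq]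
  unfold complete_trace_alt
  rw [deltas_foldl, ctScan_foldl]
  simp [ctScan]
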